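-- pv_equiv track=rewrite | github.com/RCBelmont/B001_BlenderScript | SourceCodeTool/ConfigNode.py | find_func_end
-- ===== SOURCE A (Python) =====
-- def contain_find(target_list, find_content):
--     r_idx = -1
--     for i in range(0, len(target_list)):
--         if target_list[i].__contains__(find_content):
--             r_idx = i
--             break
--     return r_idx
--
-- def find_func_end(target_list, func_name):
--     r_idx = -1
--     begin_idx = contain_find(target_list, func_name)
--     if begin_idx != -1:
--         for i in range(begin_idx, len(target_list)):
--             if target_list[i].__contains__('}'):
--                 r_idx = i
--                 break
--     return r_idx
-- ===== SOURCE B (Python) =====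
-- def find_func_end(target_list, func_name):
--     started = False
--     for i, line in enumerate(target_list):
--         if not started and func_name in line:
--             started = True
--         if started and '}' in line:
--             return i
--     return -1
-- ===== Notes on version B (the rewrite author's own statement) =====
-- stated objective: simpler
-- what changed: Replaces the two sequential scans (contain_find for func_name, then a second indexed scan from begin_idx for '}') with a single pass over enumerate(target_list) maintaining a 'started' flag, returning the first index at or after the func_name hit whose line contains '}'.
import Mathlib
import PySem

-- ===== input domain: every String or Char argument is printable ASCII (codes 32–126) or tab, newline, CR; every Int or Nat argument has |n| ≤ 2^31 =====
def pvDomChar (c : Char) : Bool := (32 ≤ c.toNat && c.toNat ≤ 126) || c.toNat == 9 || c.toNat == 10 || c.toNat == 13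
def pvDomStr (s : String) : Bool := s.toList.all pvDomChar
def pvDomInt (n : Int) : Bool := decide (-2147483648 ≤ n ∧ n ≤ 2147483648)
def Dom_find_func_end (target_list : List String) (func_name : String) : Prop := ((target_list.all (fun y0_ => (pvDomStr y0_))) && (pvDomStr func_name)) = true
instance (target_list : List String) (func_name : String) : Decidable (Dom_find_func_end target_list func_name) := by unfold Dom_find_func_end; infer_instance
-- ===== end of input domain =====

-- B: one stateful pass with a 'started' flag instead of A's two sequential scans (objective: simpler).
-- ===== PORT A =====
def pvCfGo (l : List String) (fc : String) (i : Nat) : Int :=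
  match l with
  | [] => -1
  | x :: r => if PySem.Str.isIn fc x then (i : Int) else pvCfGo r fc (i + 1)

def contain_find (target_list : List String) (find_content : String) : Int :=
  pvCfGo target_list find_content 0

def pvBraceFrom (tl : List String) (i : Nat) : Int :=
  if h : i < tl.length then
    if PySem.Str.isIn "}" tl[i] then (i : Int) else pvBraceFrom tl (i + 1)
  else -1
termination_by tl.length - i

def find_func_end (target_list : List String) (func_name : String) : Int :=
  let begin_idx := contain_find target_list func_name
  if begin_idx != -1 then pvBraceFrom target_list begin_idx.toNat else -1

-- ===== PORT B =====
def pvAltGo (l : List String) (fn : String) (i : Nat) (started : Bool) : Int :=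
  match l with
  | [] => -1
  | x :: r =>
    let started' := if !started && PySem.Str.isIn fn x then true else started
    if started' && PySem.Str.isIn "}" x then (i : Int) else pvAltGo r fn (i + 1) started'

def find_func_end_alt (target_list : List String) (func_name : String) : Int :=
  pvAltGo target_list func_name 0 false

-- ===== PRECONDITION & SPEC =====
def Spec_find_func_end (target_list : List String) (func_name : String) (out : Int) : Prop := out = find_func_end_alt target_list func_name
instance (target_list : List String) (func_name : String) (out : Int) : Decidable (Spec_find_func_end target_list func_name out) := by unfold Spec_find_func_end; infer_instance

-- ===== CLAIM (what is proved, stated in full; the proofs are below) =====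
def Claim_equal_find_func_end : Prop := ∀ (target_list : List String) (func_name : String), Dom_find_func_end target_list func_name → Spec_find_func_end target_list func_name (find_func_end target_list func_name)

-- ===== LEMMAS AND PROOFS =====
def pvBraceGo (l : List String) (i : Nat) : Int :=
  match l with
  | [] => -1
  | x :: r => if PySem.Str.isIn "}" x then (i : Int) else pvBraceGo r (i + 1)

theorem pvAltGo_true (l : List String) (fn : String) : ∀ i, pvAltGo l fn i true = pvBraceGo l i := by
  induction l with
  | nil => intro i; rfl
  | cons x r ih =>
    intro i
    by_cases hb : PySem.Chars.isIn ['}'] x.toList = true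
    · simp [pvAltGo, pvBraceGo, hb]
    · simp [pvAltGo, pvBraceGo, hb, ih]

theorem pvBraceFrom_eq (tl : List String) (i : Nat) : pvBraceFrom tl i = pvBraceGo (tl.drop i) i := by
  fun_induction pvBraceFrom tl i with
  | case1 i h hb =>
    simp at hb
    rw [List.drop_eq_getElem_cons h]
    simp [pvBraceGo, hb]
  | case2 i h hb ih =>
    simp at hb
    rw [List.drop_eq_getElem_cons h]
    simp [pvBraceGo, hb, ih]
  | case3 i h => rw [List.drop_eq_nil_of_le (by omega)]; rfl

theorem pvCfGo_ge (l : List String) (fc : String) : ∀ i : Nat, pvCfGo l fc i = -1 ∨ (i : Int) ≤ pvCfGo l fc i := by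
  induction l with
  | nil => intro i; left; rfl
  | cons x r ih =>
    intro i
    by_cases h : PySem.Chars.isIn fc.toList x.toList = true
    · right; simp [pvCfGo, h]
    · rcases ih (i + 1) with h1 | h1
      · left; simp [pvCfGo, h, h1]
      · right
        have : pvCfGo (x :: r) fc i = pvCfGo r fc (i + 1) := by simp [pvCfGo, h]
        rw [this]; push_cast at h1 ⊢; omega

theorem pvMain (l : List String) (fn : String) : ∀ i : Nat, pvAltGo l fn i false =
    if pvCfGo l fn i = -1 then -1 else pvBraceGo (l.drop ((pvCfGo l fn i).toNat - i)) (pvCfGo l fn i).toNat := by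
  induction l with
  | nil => intro i; rfl
  | cons x r ih =>
    intro i
    by_cases h : PySem.Chars.isIn fn.toList x.toList = true
    · have hne : ¬ ((i : Int) = -1) := by omega
      simp only [pvCfGo, pvAltGo, PySem.Str.isIn_eq, h, if_true, if_neg hne, Int.toNat_natCast,
        Nat.sub_self, List.drop_zero, Bool.not_false, Bool.true_and]
      by_cases hb : PySem.Chars.isIn ['}'] x.toList = true
      · simp [pvBraceGo, hb]
      · simp [pvBraceGo, hb, pvAltGo_true]
    · have e1 : pvAltGo (x :: r) fn i false = pvAltGo r fn (i + 1) false := by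
        simp [pvAltGo, h]
      have e2 : pvCfGo (x :: r) fn i = pvCfGo r fn (i + 1) := by simp [pvCfGo, h]
      rw [e1, e2, ih (i + 1)]
      by_cases hc : pvCfGo r fn (i + 1) = -1
      · simp [hc]
      · have hge : ((i : Int) + 1) ≤ pvCfGo r fn (i + 1) := by
          rcases pvCfGo_ge r fn (i + 1) with h1 | h1
          · exact absurd h1 hc
          · push_cast at h1; omega
        simp only [hc, if_false]
        have ht : (pvCfGo r fn (i + 1)).toNat - i = ((pvCfGo r fn (i + 1)).toNat - (i + 1)) + 1 := by
          omega
        rw [ht, List.drop_succ_cons]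

-- ===== VERDICT (by name: the statement is the Claim_ definition above) =====
theorem find_func_end_spec : Claim_equal_find_func_end := by
  intro tl fn _
  unfold Spec_find_func_end find_func_end find_func_end_alt contain_find
  rw [pvMain tl fn 0]
  by_cases hc : pvCfGo tl fn 0 = -1
  · simp [hc]
  · simp [hc, bne_iff_ne, pvBraceFrom_eq]
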